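-- pv_equiv track=rewrite | github.com/ash567/spell_correction | src/count_generator2.py | possible_words_delete
-- ===== SOURCE A (Python) =====
-- def possible_words_delete(word):
-- 	edit_list = set([word])
-- 	for i in range(len(word)):
-- 		edit_list.add(word[0:i] + word[i+1:])
-- 		for j in range(i, len(word)):
-- 			edit_list.add(word[0:i] + word[i+1:j] + word[j+1:])
-- 	edit_list.discard('')
-- 	return edit_list
-- ===== SOURCE B (Python) =====
-- def _dels(s):
--     """All single-character deletions of s, built recursively: drop the head,
--     or keep the head and delete one character of the tail."""
--     if not s:
--         return []
--     return [s[1:]] + [s[0] + d for d in _dels(s[1:])]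
--
-- def possible_words_delete(word):
--     edits = {word}
--     pre, suf = '', word
--     while suf:
--         rest = suf[1:]
--         edits.add(pre + rest)          # delete the current character
--         for d in _dels(rest):          # delete the current character and one later one
--             edits.add(pre + d)
--         pre, suf = pre + suf[0], rest
--     edits.discard('')
--     return edits
-- ===== Notes on version B (the rewrite author's own statement) =====
-- stated objective: alternative
-- what changed: B walks the word once with a prefix/suffix accumulator: at each position it deletes the current character and, via a recursively defined single-deletion helper applied to the remaining suffix, also deletes one later character, instead of A's nested i,j index loops over triple slice concatenations of the whole word.
import Mathlib
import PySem

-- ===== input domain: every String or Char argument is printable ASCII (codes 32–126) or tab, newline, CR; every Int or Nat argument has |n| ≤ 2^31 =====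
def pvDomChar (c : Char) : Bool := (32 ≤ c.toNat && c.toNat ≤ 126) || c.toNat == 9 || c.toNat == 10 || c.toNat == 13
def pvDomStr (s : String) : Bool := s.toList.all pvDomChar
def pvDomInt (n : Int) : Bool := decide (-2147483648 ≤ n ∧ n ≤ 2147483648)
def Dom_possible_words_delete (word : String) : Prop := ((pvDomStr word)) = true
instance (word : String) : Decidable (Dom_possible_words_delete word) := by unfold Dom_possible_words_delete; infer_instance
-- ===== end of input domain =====

-- B generates the variants by a single left-to-right walk with a prefix/suffix accumulator and a
-- recursive single-deletion helper on the suffix, instead of A's nested index loops over slices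
-- of the whole word (alternative decomposition, same cost); return-value equivalence only.

-- ===== PORT A =====
-- A's strings are ported as their char lists (PySem string ops are defined on List Char);
-- the final set is wrapped back to String with String.ofList.
def possible_words_delete (word : String) : List String :=
  let w : List Char := word.toList
  let n : Int := (PySem.Chars.len w : Int)
  let edit_list : PySem.Set (List Char) := PySem.Set.ofList [w]
  let edit_list := (PySem.List.pyRange 0 n).foldl (fun el i =>
    let el := PySem.Set.add el
      (PySem.List.slice w (some 0) (some i) ++ PySem.List.slice w (some (i + 1)) none)
    (PySem.List.pyRange i n).foldl (fun el j =>
      PySem.Set.add el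
        (PySem.List.slice w (some 0) (some i) ++ PySem.List.slice w (some (i + 1)) (some j)
          ++ PySem.List.slice w (some (j + 1)) none)) el) edit_list
  (PySem.Set.discard edit_list []).map String.ofList

-- ===== PORT B =====
-- helper _dels: all single-character deletions of s, recursively (drop the head, or keep it
-- and delete one character of the tail)
def pvDels : List Char → List (List Char)
  | [] => []
  | c :: rest => rest :: (pvDels rest).map (fun d => c :: d)

-- the while loop of Source B: walk the word with prefix `pre` and suffix `suf`
def pvGo : List Char → List Char → PySem.Set (List Char) → PySem.Set (List Char)
  | _, [], ed => ed
  | pre, c :: rest, ed =>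
      let ed := PySem.Set.add ed (pre ++ rest)
      let ed := (pvDels rest).foldl (fun e d => PySem.Set.add e (pre ++ d)) ed
      pvGo (pre ++ [c]) rest ed

def possible_words_delete_alt (word : String) : List String :=
  let w : List Char := word.toList
  let edits : PySem.Set (List Char) := PySem.Set.ofList [w]
  let edits := pvGo [] w edits
  (PySem.Set.discard edits []).map String.ofList

-- ===== PRECONDITION & SPEC =====
def Spec_possible_words_delete (word : String) (out : List String) : Prop := out = possible_words_delete_alt word
instance (word : String) (out : List String) : Decidable (Spec_possible_words_delete word out) := by unfold Spec_possible_words_delete; infer_instance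

-- ===== CLAIM (what is proved, stated in full; the proofs are below) =====
def Claim_equal_possible_words_delete : Prop := ∀ (word : String), Dom_possible_words_delete word → Spec_possible_words_delete word (possible_words_delete word)

-- ===== LEMMAS AND PROOFS =====

-- pvDels in index form: the k-th deletion of s
theorem pvDels_eq (s : List Char) :
    pvDels s = (List.range s.length).map (fun k => s.take k ++ s.drop (k + 1)) := by
  induction s with
  | nil => rfl
  | cons c rest ih =>
      simp only [pvDels, ih, List.length_cons, List.range_succ_eq_map, List.map_cons,
        List.map_map]
      refine congrArg₂ _ rfl ?_
      exact List.map_congr_left (fun k _ => by simp [Function.comp, List.take_succ_cons])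

-- the elements A's inner loop adds for j = i+1 .. n-1 are exactly pre ++ d, d ∈ pvDels rest
theorem inner_map_eq (pre rest : List Char) (c : Char) :
    (PySem.List.pyRange ((pre.length : Int) + 1) (((pre ++ c :: rest).length : Nat) : Int)).map
      (fun j => pre ++ PySem.List.slice (pre ++ c :: rest) (some ((pre.length : Int) + 1)) (some j)
        ++ PySem.List.slice (pre ++ c :: rest) (some (j + 1)) none)
    = (pvDels rest).map (fun d => pre ++ d) := by
  have hdrop : (pre ++ c :: rest).drop (pre.length + 1) = rest := by
    rw [show pre.length + 1 = (pre ++ [c]).length by simp,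
        show pre ++ c :: rest = (pre ++ [c]) ++ rest by simp]
    exact List.drop_left
  rw [PySem.List.pyRange_one, pvDels_eq, List.map_map, List.map_map]
  have hlen : ((((pre ++ c :: rest).length : Nat) : Int) - ((pre.length : Int) + 1)).toNat
      = rest.length := by simp
  rw [hlen]
  apply List.map_congr_left
  intro k hk
  rw [List.mem_range] at hk
  simp only [Function.comp]
  rw [show (pre.length : Int) + 1 = ((pre.length + 1 : Nat) : Int) by push_cast; ring]
  rw [PySem.List.slice_natCast_add, hdrop]
  rw [show ((pre.length + 1 : Nat) : Int) + (k : Int) + 1 = ((pre.length + 1 + k + 1 : Nat) : Int)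
      by push_cast; ring]
  rw [PySem.List.slice_from_natCast]
  rw [show pre.length + 1 + k + 1 = (pre.length + 1) + (k + 1) by omega, ← List.drop_drop, hdrop]
  simp [List.append_assoc]

-- A's outer loop from position pre.length onward equals B's walk over the suffix
theorem goA (w : List Char) : ∀ (suf pre : List Char) (ed : PySem.Set (List Char)),
    pre ++ suf = w →
    (PySem.List.pyRange (pre.length : Int) ((w.length : Nat) : Int)).foldl (fun el i =>
      (PySem.List.pyRange i ((w.length : Nat) : Int)).foldl (fun el j =>
        PySem.Set.add el
          (PySem.List.slice w (some 0) (some i) ++ PySem.List.slice w (some (i + 1)) (some j)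
            ++ PySem.List.slice w (some (j + 1)) none))
        (PySem.Set.add el
          (PySem.List.slice w (some 0) (some i) ++ PySem.List.slice w (some (i + 1)) none))) ed
    = pvGo pre suf ed := by
  intro suf
  induction suf with
  | nil =>
      intro pre ed hw
      rw [PySem.List.pyRange_one_eq_nil (by simp [← hw])]
      rfl
  | cons c rest ih =>
      intro pre ed hw
      subst hw
      have hn : (pre.length : Int) < (((pre ++ c :: rest).length : Nat) : Int) := by
        have : pre.length < (pre ++ c :: rest).length := by simp
        exact_mod_cast this
      have hdrop : (pre ++ c :: rest).drop (pre.length + 1) = rest := by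
        rw [show pre.length + 1 = (pre ++ [c]).length by simp,
            show pre ++ c :: rest = (pre ++ [c]) ++ rest by simp]
        exact List.drop_left
      have htake : PySem.List.slice (pre ++ c :: rest) (some 0) (some (pre.length : Int))
          = pre := by
        rw [PySem.List.slice_zero_start, PySem.List.slice_to_natCast]
        exact List.take_left
      have hsuffix : PySem.List.slice (pre ++ c :: rest) (some ((pre.length : Int) + 1)) none
          = rest := by
        rw [show (pre.length : Int) + 1 = ((pre.length + 1 : Nat) : Int) by push_cast; ring,
            PySem.List.slice_from_natCast, hdrop]
      have hmid : PySem.List.slice (pre ++ c :: rest) (some ((pre.length : Int) + 1))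
          (some (pre.length : Int)) = [] := by
        rw [show (pre.length : Int) + 1 = ((pre.length + 1 : Nat) : Int) by push_cast; ring,
            PySem.List.slice_natCast]
        simp
      have hstep := ih (pre ++ [c])
        ((pvDels rest).foldl (fun e d => PySem.Set.add e (pre ++ d))
          (PySem.Set.add ed (pre ++ rest))) (by simp)
      rw [show ((pre ++ [c]).length : Int) = (pre.length : Int) + 1 by simp] at hstep
      rw [PySem.List.pyRange_one_cons hn, List.foldl_cons]
      rw [show pvGo pre (c :: rest) ed
          = pvGo (pre ++ [c]) rest
              ((pvDels rest).foldl (fun e d => PySem.Set.add e (pre ++ d))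
                (PySem.Set.add ed (pre ++ rest))) from rfl]
      rw [← hstep]
      congr 1
      rw [htake, hsuffix]
      rw [PySem.List.pyRange_one_cons hn, List.foldl_cons]
      rw [hmid]
      simp only [List.append_nil]
      rw [hsuffix]
      rw [PySem.Set.add_of_mem
        ((PySem.Set.mem_add ed (pre ++ rest) (pre ++ rest)).2 (Or.inr rfl))]
      rw [← PySem.Set.update_map_eq_foldl_add, inner_map_eq pre rest c,
        PySem.Set.update_map_eq_foldl_add]

-- ===== VERDICT (by name: the statement is the Claim_ definition above) =====
theorem possible_words_delete_spec : Claim_equal_possible_words_delete := by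
  intro word _
  have h := goA word.toList word.toList [] (PySem.Set.ofList [word.toList]) (by simp)
  simp only [List.length_nil, Nat.cast_zero] at h
  simp only [Spec_possible_words_delete, possible_words_delete, possible_words_delete_alt]
  rw [show (PySem.Chars.len word.toList : Int) = ((word.toList.length : Nat) : Int) by simp]
  rw [h]
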